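-- pv_equiv track=rewrite | github.com/xtxdfl/CloudRealm | cloud-common/resource_management/libraries/functions/namenode_ha_utils.py | is_ha_enabled
-- ===== SOURCE A (Python) =====
-- NAMESERVICES_CONFIG = "dfs.nameservices"
--
-- def is_ha_enabled(hdfs_site: dict) -> bool:
--     """
--     检查是否启用了 HA 配置
--
--     :param hdfs_site: HDFS 配置字典
--     :return: 是否启用 HA
--     """
--     name_services = hdfs_site.get(NAMESERVICES_CONFIG)
--     if not name_services:
--         return False
--
--     for ns in name_services.split(","):
--         namenodes_key = f"dfs.ha.namenodes.{ns}"
--         if namenodes_key in hdfs_site: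
--             return True
--
--     return False
-- ===== SOURCE B (Python) =====
-- NAMESERVICES_CONFIG = "dfs.nameservices"
-- _HA_PREFIX = "dfs.ha.namenodes."
--
--
-- def is_ha_enabled(hdfs_site: dict) -> bool:
--     name_services = hdfs_site.get(NAMESERVICES_CONFIG, "")
--     ha_suffixes = {k[len(_HA_PREFIX):] for k in hdfs_site if k.startswith(_HA_PREFIX)}
--     return bool(name_services) and not ha_suffixes.isdisjoint(name_services.split(","))
-- ===== Notes on version B (the rewrite author's own statement) =====
-- stated objective: alternative
-- what changed: Instead of looping over the split nameservices with an early return, probing the dict for each 'dfs.ha.namenodes.<ns>' key, B precomputes the set of suffixes of all 'dfs.ha.namenodes.*' keys with a set comprehension and returns one boolean expression: the nameservices value is truthy and that suffix set is not disjoint from its comma-split.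
import Mathlib
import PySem

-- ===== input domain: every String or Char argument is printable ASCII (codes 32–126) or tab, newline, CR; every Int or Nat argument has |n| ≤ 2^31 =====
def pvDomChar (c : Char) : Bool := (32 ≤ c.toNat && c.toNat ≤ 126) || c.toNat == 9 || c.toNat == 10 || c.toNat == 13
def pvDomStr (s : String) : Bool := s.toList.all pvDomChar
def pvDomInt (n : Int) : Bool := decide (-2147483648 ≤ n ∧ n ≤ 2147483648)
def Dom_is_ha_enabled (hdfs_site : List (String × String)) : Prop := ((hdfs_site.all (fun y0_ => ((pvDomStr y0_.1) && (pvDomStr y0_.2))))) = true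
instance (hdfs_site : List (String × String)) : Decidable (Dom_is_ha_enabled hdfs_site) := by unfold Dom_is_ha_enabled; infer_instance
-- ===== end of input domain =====

-- B replaces A's early-return probe loop by one boolean expression over a precomputed
-- set of the suffixes of all 'dfs.ha.namenodes.*' keys (alternative decomposition).

-- ===== PORT A =====
-- literal transliteration of A: get "dfs.nameservices", falsy guard, loop over split(",") probing the dict
def is_ha_enabled (hdfs_site : List (String × String)) : Bool :=
  match (PySem.Dict.mk hdfs_site).get? "dfs.nameservices" with
  | none => false
  | some name_services =>
    if name_services = "" then false
    else
      ((PySem.Str.split? name_services ",").getD []).any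
        (fun ns => (PySem.Dict.mk hdfs_site).contains ("dfs.ha.namenodes." ++ ns))

-- ===== PORT B =====
-- literal transliteration of B: get with default "", suffix-set comprehension over the
-- dict's keys, then 'truthy and not isdisjoint(split)' as one expression
def is_ha_enabled_alt (hdfs_site : List (String × String)) : Bool :=
  let name_services := (PySem.Dict.mk hdfs_site).getD "dfs.nameservices" ""
  let ha_suffixes : PySem.Set String := PySem.Set.ofList
    (((PySem.Dict.mk hdfs_site).keys.filter
        (fun k => PySem.Str.startswith k "dfs.ha.namenodes.")).map
      (fun k => PySem.Str.slice k (some 17) none))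
  (name_services != "") &&
    !(PySem.Set.isdisjoint ha_suffixes ((PySem.Str.split? name_services ",").getD []))

-- ===== PRECONDITION & SPEC =====
def Spec_is_ha_enabled (hdfs_site : List (String × String)) (out : Bool) : Prop := out = is_ha_enabled_alt hdfs_site
instance (hdfs_site : List (String × String)) (out : Bool) : Decidable (Spec_is_ha_enabled hdfs_site out) := by unfold Spec_is_ha_enabled; infer_instance

-- ===== CLAIM (what is proved, stated in full; the proofs are below) =====
def Claim_equal_is_ha_enabled : Prop := ∀ (hdfs_site : List (String × String)), Dom_is_ha_enabled hdfs_site → Spec_is_ha_enabled hdfs_site (is_ha_enabled hdfs_site)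

-- ===== LEMMAS AND PROOFS =====

-- a key equals "dfs.ha.namenodes." ++ s iff it starts with the prefix and its 17-char-drop suffix is s
theorem pv_key_eq_iff (k s : String) :
    k = "dfs.ha.namenodes." ++ s ↔
      (PySem.Str.startswith k "dfs.ha.namenodes." = true ∧ PySem.Str.slice k (some 17) none = s) := by
  constructor
  · rintro rfl
    refine ⟨?_, ?_⟩
    · rw [PySem.Str.startswith_eq, PySem.Chars.startswith_iff, String.toList_append]
      exact List.prefix_append _ _
    · rw [← String.toList_inj, PySem.Str.toList_slice, PySem.Chars.slice_eq_listSlice,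
        PySem.List.slice_from _ (show (0:Int) ≤ 17 by norm_num), String.toList_append]
      rw [show (Int.toNat 17) = ("dfs.ha.namenodes." : String).toList.length from by decide,
        List.drop_left]
  · rintro ⟨hpre, rfl⟩
    rw [PySem.Str.startswith_eq, PySem.Chars.startswith_iff] at hpre
    obtain ⟨t, ht⟩ := hpre
    rw [← String.toList_inj, String.toList_append, PySem.Str.toList_slice,
      PySem.Chars.slice_eq_listSlice, PySem.List.slice_from _ (show (0:Int) ≤ 17 by norm_num), ← ht]
    rw [show (Int.toNat 17) = ("dfs.ha.namenodes." : String).toList.length from by decide,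
      List.drop_left]

-- A's probe loop and B's not-isdisjoint over the suffix set agree
theorem pv_any_eq_not_isdisjoint (hdfs_site : List (String × String)) (ns : String) :
    ((PySem.Str.split? ns ",").getD []).any
        (fun s => (PySem.Dict.mk hdfs_site).contains ("dfs.ha.namenodes." ++ s))
      = !(PySem.Set.isdisjoint
            (PySem.Set.ofList
              (((PySem.Dict.mk hdfs_site).keys.filter
                  (fun k => PySem.Str.startswith k "dfs.ha.namenodes.")).map
                (fun k => PySem.Str.slice k (some 17) none)))
            ((PySem.Str.split? ns ",").getD [])) := by
  rw [← Bool.coe_iff_coe]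
  simp only [List.any_eq_true, Bool.not_eq_true', ← Bool.not_eq_true,
    PySem.Set.isdisjoint_iff, PySem.Dict.contains_iff_mem_keys]
  constructor
  · rintro ⟨s, hs, hk⟩ hdisj
    exact hdisj _ ((PySem.Set.mem_ofList _ _).mpr
      (List.mem_map.mpr ⟨_, List.mem_filter.mpr ⟨hk, ((pv_key_eq_iff _ s).mp rfl).1⟩,
        ((pv_key_eq_iff _ s).mp rfl).2⟩)) hs
  · intro h
    by_contra hno
    push Not at hno
    apply h
    intro x hx hxs
    obtain ⟨k, hkf, hks⟩ := List.mem_map.mp ((PySem.Set.mem_ofList _ _).mp hx)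
    obtain ⟨hkmem, hkpre⟩ := List.mem_filter.mp hkf
    exact hno x hxs (by rw [← (pv_key_eq_iff k x).mpr ⟨hkpre, hks⟩]; exact hkmem)

-- ===== VERDICT (by name: the statement is the Claim_ definition above) =====
theorem is_ha_enabled_spec : Claim_equal_is_ha_enabled := by
  intro h _
  unfold Spec_is_ha_enabled is_ha_enabled is_ha_enabled_alt
  rw [PySem.Dict.getD_eq_get?_getD]
  cases hg : (PySem.Dict.mk h).get? "dfs.nameservices" with
  | none => simp
  | some ns =>
    by_cases he : ns = ""
    · simp [he]
    · simp only [Option.getD_some, if_neg he, show (ns != "") = true from by simp [he],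
        Bool.true_and]
      exact pv_any_eq_not_isdisjoint h ns
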